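-- pv_equiv track=rewrite | github.com/pradyuman-verma/CodeForcesProblems | A/A_Boring_Apartments.py | f
-- ===== SOURCE A (Python) =====
-- def f(x):
--     xx = len(str(x))
--     cnt = 0
--     xy = int(str(x)[0]) - 1
--     cnt += 10 * (xy)
--     while xx > 0:
--         cnt += xx
--         xx -=1
--     return cnt
-- ===== SOURCE B (Python) =====
-- def f(x):
--     d = len(str(x))
--     return 10 * (int(str(x)[0]) - 1) + d * (d + 1) // 2
-- ===== Notes on version B (the rewrite author's own statement) =====
-- stated objective: simpler
-- what changed: The counting while-loop over the digit count is replaced by the triangular-number closed form d*(d+1)//2, evaluated in one arithmetic expression.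
-- outside the precondition, e.g. on f(-5): A raises ValueError, B raises ValueError
import Mathlib
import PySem

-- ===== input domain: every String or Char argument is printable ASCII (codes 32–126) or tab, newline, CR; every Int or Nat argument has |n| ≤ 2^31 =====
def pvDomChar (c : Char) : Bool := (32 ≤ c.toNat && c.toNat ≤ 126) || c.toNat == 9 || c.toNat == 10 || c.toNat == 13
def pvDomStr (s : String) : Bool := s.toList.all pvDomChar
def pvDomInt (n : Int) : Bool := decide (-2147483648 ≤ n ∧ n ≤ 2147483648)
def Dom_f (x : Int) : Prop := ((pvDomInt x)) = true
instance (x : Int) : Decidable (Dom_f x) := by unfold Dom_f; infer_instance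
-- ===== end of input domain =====

-- B replaces A's counting while-loop by the closed form d*(d+1)//2 (simpler).

-- ===== PORT A =====
-- the while loop: while xx > 0: cnt += xx; xx -= 1  (structural recursion on xx)
def fLoop : Nat → Int → Int
  | 0, cnt => cnt
  | n + 1, cnt => fLoop n (cnt + ((n : Int) + 1))

def f (x : Int) : Int :=
  let s := PySem.Int.toChars x
  let xx := s.length
  let cnt : Int := 0
  let xy := (match PySem.List.pyGet? s 0 with
             | some c => (PySem.Int.ofChars? [c]).getD 0
             | none => 0) - 1
  fLoop xx (cnt + 10 * xy)

-- ===== PORT B =====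
def f_alt (x : Int) : Int :=
  let s := PySem.Int.toChars x
  let d : Int := s.length
  let xy := (match PySem.List.pyGet? s 0 with
             | some c => (PySem.Int.ofChars? [c]).getD 0
             | none => 0) - 1
  10 * xy + PySem.Int.floordiv (d * (d + 1)) 2

-- ===== PRECONDITION & SPEC =====
-- Pre_f excludes negative x: there str(x)[0] = '-' and int('-') raises ValueError in A (and in B).
def Pre_f (x : Int) : Prop := 0 ≤ x
instance (x : Int) : Decidable (Pre_f x) := by unfold Pre_f; infer_instance
def pvWitness_f : Int := 130

def Spec_f (x : Int) (out : Int) : Prop := out = f_alt x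
instance (x : Int) (out : Int) : Decidable (Spec_f x out) := by unfold Spec_f; infer_instance

-- ===== CLAIM (what is proved, stated in full; the proofs are below) =====
def Claim_equal_f : Prop := ∀ (x : Int), Dom_f x → Pre_f x → Spec_f x (f x)

-- ===== LEMMAS AND PROOFS =====
def tri : Nat → Nat
  | 0 => 0
  | n + 1 => tri n + (n + 1)

theorem fLoop_eq (n : Nat) : ∀ c : Int, fLoop n c = c + (tri n : Int) := by
  induction n with
  | zero => intro c; simp [fLoop, tri]
  | succ n ih =>
    intro c
    simp only [fLoop, tri, ih]
    push_cast
    ring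

theorem two_tri (n : Nat) : 2 * tri n = n * (n + 1) := by
  induction n with
  | zero => rfl
  | succ n ih => simp only [tri]; rw [Nat.mul_add, ih]; ring

theorem floordiv_tri (n : Nat) :
    PySem.Int.floordiv ((n : Int) * ((n : Int) + 1)) 2 = (tri n : Int) := by
  have h : ((n : Int) * ((n : Int) + 1)) = ((n * (n + 1) : Nat) : Int) := by push_cast; ring
  rw [h, ← two_tri n]
  rw [show (2 : Int) = ((2 : Nat) : Int) from rfl,
     PySem.Int.floordiv_natCast (2 * tri n) 2, Nat.mul_div_cancel_left _ (by norm_num)]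

-- ===== VERDICT (by name: the statement is the Claim_ definition above) =====
theorem f_spec : Claim_equal_f := by
  intro x _ _
  unfold Spec_f f f_alt
  simp only [fLoop_eq, floordiv_tri]
  ring
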